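-- pv_equiv track=rewrite | github.com/jramaswami/Binary_Search_Python | kth_user.py | solve
-- ===== SOURCE A (Python) =====
-- def solve(requests, k):
--     events = []
--     for i, (b, e) in enumerate(requests):
--         events.append((b, 1, i))
--         events.append((e+1, 0, i))
--
--     events.sort()
--     can_be_kth = set()
--     previous_visitors = 0
--     current_visitors = 0
--     new_visitors = set()
--     for timer, etype, visitor in events:
--         if etype == 0:
--             new_visitors.discard(visitor)
--             current_visitors -= 1
--             previous_visitors += 1
--         else:
--             new_visitors.add(visitor)
--             current_visitors += 1
--
--         min_visitor = previous_visitors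
--         max_visitor = current_visitors + previous_visitors - 1
--         if k >= min_visitor and k <= max_visitor:
--             can_be_kth.update(new_visitors)
--             new_visitors = set()
--
--         if previous_visitors > k:
--             break
--
--     return list(sorted(can_be_kth))
-- ===== SOURCE B (Python) =====
-- def solve(requests, k):
--     # Same sorted event list as the task demands; then, instead of one sweep
--     # maintaining mutable sets with flush-on-qualifying-event, answer each
--     # request independently with a stateless scan: request x qualifies iff a
--     # "qualifying" event (k-th visitor possible) occurs while x is pending.
--     events = []
--     for i, (b, e) in enumerate(requests):
--         events.append((b, 1, i))
--         events.append((e + 1, 0, i))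
--     events.sort()
--
--     def qualifies(x):
--         prev = 0
--         cur = 0
--         active = False
--         for t, ty, v in events:
--             if ty == 1:
--                 cur += 1
--                 if v == x:
--                     active = True
--             else:
--                 if v == x:
--                     if active:
--                         return False
--                 cur -= 1
--                 prev += 1
--             if active and prev <= k <= prev + cur - 1:
--                 return True
--         return False
--
--     return [i for i in range(len(requests)) if qualifies(i)]
-- ===== Notes on version B (the rewrite author's own statement) =====
-- stated objective: alternative
-- what changed: A does one sweep over the sorted events maintaining mutable new-visitor/answer sets with flush-on-qualifying-event and an early break; B answers each request independently with a stateless scan of the sorted events (counters plus an 'active' flag), collecting qualifying indices in order.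
import Mathlib
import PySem

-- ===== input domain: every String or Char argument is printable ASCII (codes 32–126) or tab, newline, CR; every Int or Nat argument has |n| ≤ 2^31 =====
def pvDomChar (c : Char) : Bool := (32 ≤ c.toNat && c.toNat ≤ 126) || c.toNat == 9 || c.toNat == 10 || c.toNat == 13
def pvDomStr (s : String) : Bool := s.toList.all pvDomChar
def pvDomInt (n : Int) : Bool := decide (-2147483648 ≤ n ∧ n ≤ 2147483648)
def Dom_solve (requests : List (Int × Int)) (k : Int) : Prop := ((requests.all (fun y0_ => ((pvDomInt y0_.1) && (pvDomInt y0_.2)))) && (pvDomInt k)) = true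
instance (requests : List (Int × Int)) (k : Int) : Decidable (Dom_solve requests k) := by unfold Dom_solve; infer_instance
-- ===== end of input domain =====

-- B replaces A's single sweep with mutable new-visitor/answer sets by an independent
-- stateless scan of the sorted events for each request (objective: alternative, not faster).

-- ===== PORT A =====
-- the event-building loop and events.sort() are textually identical in Source A and Source B,
-- so both ports share these two helpers.
def pvBuildEvents (requests : List (Int × Int)) : List (Int × Int × Int) :=
  (PySem.List.enumerate requests 0).foldl
    (fun acc p => acc ++ [(p.2.1, 1, p.1), (p.2.2 + 1, 0, p.1)]) []

-- events.sort() on triples: Python's lexicographic tuple sort, rendered exactly as a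
-- stable sort by the third component followed by a stable sort on the (first, second)
-- key pair (exact by stability of both passes).
def pvSortEvents (evs : List (Int × Int × Int)) : List (Int × Int × Int) :=
  PySem.List.sorted2 (PySem.List.sorted evs (fun e => e.2.2) false)
    (fun e => e.1) (fun e => e.2.1) false

def solveLoop (k : Int) : List (Int × Int × Int) → PySem.Set Int → Int → Int → PySem.Set Int → PySem.Set Int
  | [], canBe, _, _, _ => canBe
  | (_, ty, v) :: es, canBe, prev, cur, newV =>
    let newV1 := if ty == 0 then PySem.Set.discard newV v else PySem.Set.add newV v
    let cur1 := if ty == 0 then cur - 1 else cur + 1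
    let prev1 := if ty == 0 then prev + 1 else prev
    let canBe1 := if k ≥ prev1 ∧ k ≤ cur1 + prev1 - 1 then PySem.Set.update canBe newV1 else canBe
    let newV2 := if k ≥ prev1 ∧ k ≤ cur1 + prev1 - 1 then PySem.Set.empty else newV1
    if prev1 > k then canBe1 else solveLoop k es canBe1 prev1 cur1 newV2

def solve (requests : List (Int × Int)) (k : Int) : List Int :=
  PySem.List.sorted
    (solveLoop k (pvSortEvents (pvBuildEvents requests)) PySem.Set.empty 0 0 PySem.Set.empty)
    (fun x => x) false

-- ===== PORT B =====
-- Source B's per-request helper 'qualifies': a stateless scan of the shared event list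
def qloop (k x : Int) : List (Int × Int × Int) → Int → Int → Bool → Bool
  | [], _, _, _ => false
  | (_, ty, v) :: es, prev, cur, active =>
    if ty == 1 then
      let cur1 := cur + 1
      let active1 := if v == x then true else active
      if active1 && decide (prev ≤ k) && decide (k ≤ prev + cur1 - 1) then true
      else qloop k x es prev cur1 active1
    else
      if v == x && active then false
      else
        let cur1 := cur - 1
        let prev1 := prev + 1
        if active && decide (prev1 ≤ k) && decide (k ≤ prev1 + cur1 - 1) then true
        else qloop k x es prev1 cur1 active

def solve_alt (requests : List (Int × Int)) (k : Int) : List Int :=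
  let events := pvSortEvents (pvBuildEvents requests)
  (PySem.List.pyRange 0 requests.length 1).filter (fun i => qloop k i events 0 0 false)

-- ===== PRECONDITION & SPEC =====
def Spec_solve (requests : List (Int × Int)) (k : Int) (out : List Int) : Prop := out = solve_alt requests k
instance (requests : List (Int × Int)) (k : Int) (out : List Int) : Decidable (Spec_solve requests k out) := by unfold Spec_solve; infer_instance

-- ===== CLAIM (what is proved, stated in full; the proofs are below) =====
def Claim_equal_solve : Prop := ∀ (requests : List (Int × Int)) (k : Int), Dom_solve requests k → Spec_solve requests k (solve requests k)

-- ===== LEMMAS AND PROOFS =====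

theorem qloop_of_gt (k x : Int) : ∀ (es : List (Int × Int × Int)) (prev cur : Int) (active : Bool),
    k < prev → qloop k x es prev cur active = false := by
  intro es
  induction es with
  | nil => intro prev cur active _; simp [qloop]
  | cons e es ih =>
    obtain ⟨t, ty, v⟩ := e
    intro prev cur active h
    have h1 : decide (prev ≤ k) = false := by simp; omega
    have h2 : decide (prev + 1 ≤ k) = false := by simp; omega
    by_cases hty : (ty == 1) = true
    · simp [qloop, hty, h1, ih _ _ _ h]
    · by_cases hv : (v == x && active) = true
      · simp [qloop, hty, hv]
      · simp [qloop, hty, hv, ih _ _ _ (by omega : k < prev + 1)]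
        intro _ h'
        omega

theorem qloop_of_no_start (k x : Int) : ∀ (es : List (Int × Int × Int)) (prev cur : Int),
    (∀ e ∈ es, ¬(e.2.1 = 1 ∧ e.2.2 = x)) → qloop k x es prev cur false = false := by
  intro es
  induction es with
  | nil => intro _ _ _; simp [qloop]
  | cons e es ih =>
    obtain ⟨t, ty, v⟩ := e
    intro prev cur h
    have hes : ∀ e ∈ es, ¬(e.2.1 = 1 ∧ e.2.2 = x) := fun e he => h e (List.mem_cons_of_mem _ he)
    by_cases hty : (ty == 1) = true
    · have hvx : v ≠ x := by
        have h0 := h (t, ty, v) (List.mem_cons_self ..)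
        simp at hty
        simp [hty] at h0
        exact h0
      simp [qloop, hty, hvx, ih _ _ hes]
    · simp [qloop, hty, ih _ _ hes]

theorem solveLoop_mem (k x : Int) : ∀ (es : List (Int × Int × Int)) (canBe newV : PySem.Set Int) (prev cur : Int),
    (∀ e ∈ es, e.2.1 = 0 ∨ e.2.1 = 1) →
    es.countP (fun e => e.2.1 == 1 && e.2.2 == x) ≤ 1 →
    (x ∈ newV → ∀ e ∈ es, ¬(e.2.1 = 1 ∧ e.2.2 = x)) →
    (x ∈ solveLoop k es canBe prev cur newV ↔
      x ∈ canBe ∨ qloop k x es prev cur (decide (x ∈ newV)) = true) := by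
  intro es
  induction es with
  | nil => intro canBe newV prev cur _ _ _; simp [solveLoop, qloop]
  | cons e es ih =>
    obtain ⟨t, ty, v⟩ := e
    intro canBe newV prev cur hty01 hcount hstart
    have htyes : ∀ e ∈ es, e.2.1 = 0 ∨ e.2.1 = 1 := fun e he => hty01 e (List.mem_cons_of_mem _ he)
    have hcountes : es.countP (fun e => e.2.1 == 1 && e.2.2 == x) ≤ 1 := by
      rw [List.countP_cons] at hcount
      omega
    rcases hty01 (t, ty, v) (List.mem_cons_self ..) with hty | hty
    · have ty0 : ty = 0 := hty
      subst ty0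
      simp only [solveLoop, qloop]
      norm_num
      by_cases hb : k ≤ prev
      · have h1 : ¬(prev < k ∧ k < cur + prev) := by omega
        rw [if_pos hb, if_neg h1]
        have hq := qloop_of_gt k x es (prev + 1) (cur - 1) (decide (x ∈ newV)) (by omega)
        simp [hq, show ¬(prev < k) from by omega]
      · rw [if_neg hb]
        by_cases hf : prev < k ∧ k < cur + prev
        · rw [if_pos hf, if_pos hf]
          rw [ih (canBe.update (newV.discard v)) ([] : PySem.Set Int) (prev + 1) (cur - 1) htyes
            hcountes (by intro h; simp at h)]
          by_cases hvx : x = v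
          · subst hvx
            by_cases hxnew : x ∈ newV
            · have hns : ∀ e ∈ es, ¬(e.2.1 = 1 ∧ e.2.2 = x) :=
                fun e he => hstart hxnew e (List.mem_cons_of_mem _ he)
              simp [PySem.Set.mem_update, PySem.Set.mem_discard, hxnew,
                qloop_of_no_start k x es _ _ hns]
            · simp [PySem.Set.mem_update, PySem.Set.mem_discard, hxnew]
          · by_cases hxnew : x ∈ newV
            · simp [PySem.Set.mem_update, PySem.Set.mem_discard, hxnew, hvx,
                Ne.symm hvx, hf.1, show k < prev + cur from by omega]
            · simp [PySem.Set.mem_update, PySem.Set.mem_discard, hxnew, hvx]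
        · rw [if_neg hf, if_neg hf]
          have hstart' : x ∈ newV.discard v → ∀ e ∈ es, ¬(e.2.1 = 1 ∧ e.2.2 = x) := by
            intro h e he
            exact hstart (by simp [PySem.Set.mem_discard] at h; exact h.1) e (List.mem_cons_of_mem _ he)
          rw [ih canBe (newV.discard v) (prev + 1) (cur - 1) htyes hcountes hstart']
          by_cases hvx : x = v
          · subst hvx
            by_cases hxnew : x ∈ newV
            · have hns : ∀ e ∈ es, ¬(e.2.1 = 1 ∧ e.2.2 = x) :=
                fun e he => hstart hxnew e (List.mem_cons_of_mem _ he)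
              simp [PySem.Set.mem_discard, hxnew, qloop_of_no_start k x es _ _ hns]
            · simp [PySem.Set.mem_discard, hxnew]
          · by_cases hxnew : x ∈ newV
            · simp [PySem.Set.mem_discard, hxnew, hvx, Ne.symm hvx,
                show ¬(prev < k ∧ k < prev + cur) from by omega]
            · simp [PySem.Set.mem_discard, hxnew, hvx, Ne.symm hvx]
    · have ty1 : ty = 1 := hty
      subst ty1
      simp only [solveLoop, qloop]
      norm_num
      by_cases hb : k < prev
      · have h1 : ¬(prev ≤ k ∧ k < cur + 1 + prev) := by omega
        rw [if_pos hb, if_neg h1]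
        have hq := qloop_of_gt k x es prev (cur + 1) (decide (v = x) || decide (x ∈ newV)) hb
        simp [hq, show ¬(prev ≤ k) from by omega]
      · rw [if_neg hb]
        by_cases hf : prev ≤ k ∧ k < cur + 1 + prev
        · rw [if_pos hf, if_pos hf]
          rw [ih (canBe.update (newV.add v)) ([] : PySem.Set Int) prev (cur + 1) htyes
            hcountes (by intro h; simp at h)]
          by_cases hvx : x = v
          · subst hvx
            simp [PySem.Set.mem_update, PySem.Set.mem_add, hf.1, show k < prev + (cur + 1) from by omega]
          · by_cases hxnew : x ∈ newV
            · simp [PySem.Set.mem_update, PySem.Set.mem_add, hxnew, hvx, hf.1,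
                show k < prev + (cur + 1) from by omega]
            · simp [PySem.Set.mem_update, PySem.Set.mem_add, hxnew, hvx, Ne.symm hvx]
        · rw [if_neg hf, if_neg hf]
          have hstart'' : x ∈ newV.add v → ∀ e ∈ es, ¬(e.2.1 = 1 ∧ e.2.2 = x) := by
            intro h e he hcon
            rw [PySem.Set.mem_add] at h
            rcases h with h | h
            · exact hstart h e (List.mem_cons_of_mem _ he) hcon
            · rw [List.countP_cons] at hcount
              have hhead : ((((t, 1, v) : Int × Int × Int)).2.1 == 1 && (((t, 1, v) : Int × Int × Int)).2.2 == x) = true := by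
                simp [h]
              simp only [hhead, if_true] at hcount
              have h0 : List.countP (fun e => e.2.1 == 1 && e.2.2 == x) es = 0 := by omega
              have hfalse := List.countP_eq_zero.mp h0 e he
              simp [hcon.1, hcon.2] at hfalse
          rw [ih canBe (newV.add v) prev (cur + 1) htyes hcountes hstart'']
          by_cases hvx : x = v
          · subst hvx
            simp [PySem.Set.mem_add, show ¬(k < prev + (cur + 1)) from by omega]
          · by_cases hxnew : x ∈ newV
            · simp [PySem.Set.mem_add, hxnew, hvx, Ne.symm hvx,
                show ¬(k < prev + (cur + 1)) from by omega]
            · simp [PySem.Set.mem_add, hxnew, hvx, Ne.symm hvx]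

theorem solveLoop_nodup (k : Int) : ∀ (es : List (Int × Int × Int)) (canBe newV : PySem.Set Int) (prev cur : Int),
    canBe.Nodup → (solveLoop k es canBe prev cur newV).Nodup := by
  intro es
  induction es with
  | nil => intro canBe newV prev cur h; simpa [solveLoop] using h
  | cons e es ih =>
    obtain ⟨t, ty, v⟩ := e
    intro canBe newV prev cur h
    simp only [solveLoop]
    split_ifs
    all_goals first
      | exact h
      | exact PySem.Set.nodup_update _ _ h
      | exact ih _ _ _ _ h
      | exact ih _ _ _ _ (PySem.Set.nodup_update _ _ h)

theorem build_eq_flatMap (requests : List (Int × Int)) :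
    (PySem.List.enumerate requests 0).foldl
        (fun acc p => acc ++ [(p.2.1, 1, p.1), (p.2.2 + 1, 0, p.1)]) [] =
      (PySem.List.enumerate requests 0).flatMap (fun p => ([(p.2.1, 1, p.1), (p.2.2 + 1, 0, p.1)] : List (Int × Int × Int))) := by
  rw [PySem.List.foldl_append_eq_flatMap]
  simp

theorem build_facts (x : Int) : ∀ (reqs : List (Int × Int)) (s : Int),
    (∀ e ∈ (PySem.List.enumerate reqs s).flatMap (fun p => ([(p.2.1, 1, p.1), (p.2.2 + 1, 0, p.1)] : List (Int × Int × Int))),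
        (e.2.1 = 0 ∨ e.2.1 = 1) ∧ s ≤ e.2.2 ∧ e.2.2 < s + reqs.length) ∧
    ((PySem.List.enumerate reqs s).flatMap (fun p => ([(p.2.1, 1, p.1), (p.2.2 + 1, 0, p.1)] : List (Int × Int × Int)))).countP
        (fun e => e.2.1 == 1 && e.2.2 == x) = (if s ≤ x ∧ x < s + reqs.length then 1 else 0) := by
  intro reqs
  induction reqs with
  | nil => intro s; simp [PySem.List.enumerate_nil]
  | cons r reqs ih =>
    intro s
    rw [PySem.List.enumerate_cons]
    constructor
    · intro e he
      simp only [List.flatMap_cons, List.mem_append] at he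
      rcases he with he | he
      · simp at he
        rcases he with he | he <;> subst he <;> simp
      · have h := (ih (s + 1)).1 e he
        refine ⟨h.1, ?_, ?_⟩
        · have := h.2.1
          omega
        · have := h.2.2
          simp only [List.length_cons] at this ⊢
          push_cast at this ⊢
          omega
    · rw [List.flatMap_cons, List.countP_append, (ih (s + 1)).2]
      by_cases hsx : s = x
      · subst hsx
        simp only [List.countP_cons, List.countP_nil, List.length_cons]
        norm_num
      · have h1 : (s == x) = false := by simp [hsx]
        simp only [List.countP_cons, List.countP_nil, List.length_cons]
        norm_num [h1]
        split_ifs <;> push_cast at * <;> try omega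

theorem sortEvents_perm (evs : List (Int × Int × Int)) : (pvSortEvents evs).Perm evs := by
  unfold pvSortEvents
  exact (PySem.List.sorted2_perm ..).trans (PySem.List.sorted_perm ..)

-- ===== VERDICT (by name: the statement is the Claim_ definition above) =====
theorem solve_spec : Claim_equal_solve := by
  intro requests k _dom
  unfold Spec_solve solve solve_alt
  have hperm : (pvSortEvents (pvBuildEvents requests)).Perm
      ((PySem.List.enumerate requests 0).flatMap (fun p => ([(p.2.1, 1, p.1), (p.2.2 + 1, 0, p.1)] : List (Int × Int × Int)))) := by
    rw [show (PySem.List.enumerate requests 0).flatMap (fun p => ([(p.2.1, 1, p.1), (p.2.2 + 1, 0, p.1)] : List (Int × Int × Int)))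
        = pvBuildEvents requests from (build_eq_flatMap requests).symm]
    exact sortEvents_perm (pvBuildEvents requests)
  set E := pvSortEvents (pvBuildEvents requests) with hE
  have hty : ∀ e ∈ E, e.2.1 = 0 ∨ e.2.1 = 1 := by
    intro e he
    exact ((build_facts 0 requests 0).1 e (hperm.mem_iff.mp he)).1
  have hcount : ∀ x : Int, E.countP (fun e => e.2.1 == 1 && e.2.2 == x) =
      (if 0 ≤ x ∧ x < (requests.length : Int) then 1 else 0) := by
    intro x
    rw [hperm.countP_eq]
    simpa using (build_facts x requests 0).2
  have hmem : ∀ x : Int, x ∈ solveLoop k E PySem.Set.empty 0 0 PySem.Set.empty ↔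
      qloop k x E 0 0 false = true := by
    intro x
    rw [solveLoop_mem k x E PySem.Set.empty PySem.Set.empty 0 0 hty
      (by rw [hcount x]; split <;> omega) (by intro h; simp at h)]
    simp [PySem.Set.empty]
  have hbound : ∀ x : Int, qloop k x E 0 0 false = true → 0 ≤ x ∧ x < (requests.length : Int) := by
    intro x hq
    by_contra hc
    have h0 : E.countP (fun e => e.2.1 == 1 && e.2.2 == x) = 0 := by rw [hcount x]; simp [hc]
    have hns : ∀ e ∈ E, ¬(e.2.1 = 1 ∧ e.2.2 = x) := by
      intro e he hcon
      have := List.countP_eq_zero.mp h0 e he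
      simp [hcon.1, hcon.2] at this
    rw [qloop_of_no_start k x E 0 0 hns] at hq
    exact absurd hq (by simp)
  apply PySem.List.sorted_eq_of_perm_of_pairwise_lt
  · rw [List.perm_ext_iff_of_nodup
      ((PySem.List.nodup_pyRange_one ..).filter _)
      (solveLoop_nodup k E PySem.Set.empty PySem.Set.empty 0 0 List.nodup_nil)]
    intro a
    rw [List.mem_filter, PySem.List.mem_pyRange_one, hmem a]
    constructor
    · rintro ⟨_, hq⟩; exact hq
    · intro hq; exact ⟨hbound a hq, hq⟩
  · exact (PySem.List.pairwise_lt_pyRange_one ..).filter _
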